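-- pv_equiv track=rewrite | github.com/twmcdunn/set_multiplication_factors | main.py | allMultiples
-- ===== SOURCE A (Python) =====
-- def allMultiples(seta, setb, mult = []):
--     if len(mult) == len(seta):
--         return [mult]
--     mult1 = mult.copy()
--     mult1.append(seta)
--     options1 = allMultiples(seta,setb,mult1)
--     mult2 = mult.copy()
--     mult2.append(setb)
--     options2 = allMultiples(seta,setb,mult2)
--     options1.extend(options2)
--     return options1
-- ===== SOURCE B (Python) =====
-- def allMultiples(seta, setb, mult=[]):
--     r = len(seta) - len(mult)
--     combos = [list(mult)]
--     for _ in range(r):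
--         combos = [c + [s] for c in combos for s in (seta, setb)]
--     return combos
-- ===== Notes on version B (the rewrite author's own statement) =====
-- stated objective: simpler
-- what changed: Replaces the binary recursion (two recursive calls per free slot, list copies and extend) by one iterative loop that doubles a worklist of partial selections for each free position, preserving A's seta-first enumeration order.
import Mathlib
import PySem

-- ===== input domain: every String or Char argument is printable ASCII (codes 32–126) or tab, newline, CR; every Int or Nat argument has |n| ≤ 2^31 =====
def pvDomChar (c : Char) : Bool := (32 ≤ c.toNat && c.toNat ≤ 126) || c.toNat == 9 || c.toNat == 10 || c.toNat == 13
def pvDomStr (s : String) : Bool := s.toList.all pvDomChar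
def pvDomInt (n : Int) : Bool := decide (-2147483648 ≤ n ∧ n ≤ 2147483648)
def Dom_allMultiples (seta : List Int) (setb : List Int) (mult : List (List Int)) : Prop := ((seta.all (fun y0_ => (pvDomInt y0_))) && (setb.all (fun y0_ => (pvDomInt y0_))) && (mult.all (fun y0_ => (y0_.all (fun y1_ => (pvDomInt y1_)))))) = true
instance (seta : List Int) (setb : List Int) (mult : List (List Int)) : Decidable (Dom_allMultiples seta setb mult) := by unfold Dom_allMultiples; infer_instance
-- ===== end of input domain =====

-- B replaces A's binary recursion by one iterative loop doubling a worklist of partial selections (simpler decomposition, same cost).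


-- ===== PORT A =====
-- Literal port of A's recursion; the 'else []' branch totalizes the case
-- mult.length > seta.length, where the Python recurses forever (RecursionError) — excluded by Pre_.
def allMultiples (seta : List Int) (setb : List Int) (mult : List (List Int)) : List (List (List Int)) :=
  if mult.length = seta.length then [mult]
  else if _h : mult.length < seta.length then
    let mult1 := mult ++ [seta]
    let options1 := allMultiples seta setb mult1
    let mult2 := mult ++ [setb]
    let options2 := allMultiples seta setb mult2
    options1 ++ options2
  else []
termination_by seta.length - mult.length
decreasing_by all_goals (simp; omega)

-- ===== PORT B =====
-- Source B's loop body: combos = [c + [s] for c in combos for s in (seta, setb)]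
def allMultiples_alt (seta : List Int) (setb : List Int) (mult : List (List Int)) : List (List (List Int)) :=
  let r := seta.length - mult.length
  (List.range r).foldl (fun combos _ => combos.flatMap (fun c => [c ++ [seta], c ++ [setb]])) [mult]

-- ===== PRECONDITION & SPEC =====
-- Pre_ excludes mult longer than seta: there the Python A recurses without reaching its base case and raises RecursionError (it never returns a value).
def Pre_allMultiples (seta : List Int) (setb : List Int) (mult : List (List Int)) : Prop :=
  mult.length ≤ seta.length
instance (seta : List Int) (setb : List Int) (mult : List (List Int)) : Decidable (Pre_allMultiples seta setb mult) := by unfold Pre_allMultiples; infer_instance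
def pvWitness_allMultiples : List Int × List Int × List (List Int) := ([1, 2], [3, 4], [])


def Spec_allMultiples (seta : List Int) (setb : List Int) (mult : List (List Int)) (out : List (List (List Int))) : Prop := out = allMultiples_alt seta setb mult
instance (seta : List Int) (setb : List Int) (mult : List (List Int)) (out : List (List (List Int))) : Decidable (Spec_allMultiples seta setb mult out) := by unfold Spec_allMultiples; infer_instance

-- ===== CLAIM (what is proved, stated in full; the proofs are below) =====
def Claim_equal_allMultiples : Prop := ∀ (seta : List Int) (setb : List Int) (mult : List (List Int)), Dom_allMultiples seta setb mult → Pre_allMultiples seta setb mult → Spec_allMultiples seta setb mult (allMultiples seta setb mult)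

-- ===== LEMMAS AND PROOFS =====

-- B's loop body as a function.
def pvStep (seta setb : List Int) (combos : List (List (List Int))) : List (List (List Int)) :=
  combos.flatMap (fun c => [c ++ [seta], c ++ [setb]])

lemma pvStep_append (seta setb : List Int) (x y : List (List (List Int))) :
    pvStep seta setb (x ++ y) = pvStep seta setb x ++ pvStep seta setb y := by
  simp [pvStep]

lemma pvStep_iterate_append (seta setb : List Int) (n : Nat) (x y : List (List (List Int))) :
    (pvStep seta setb)^[n] (x ++ y) = (pvStep seta setb)^[n] x ++ (pvStep seta setb)^[n] y := by
  induction n generalizing x y with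
  | zero => rfl
  | succ n ih => simp [Function.iterate_succ_apply, pvStep_append, ih]

lemma foldl_range_iterate (f : List (List (List Int)) → List (List (List Int)))
    (n : Nat) (x : List (List (List Int))) :
    (List.range n).foldl (fun c _ => f c) x = f^[n] x := by
  induction n with
  | zero => rfl
  | succ n ih => simp [List.range_succ, List.foldl_append, ih, Function.iterate_succ_apply']

lemma allMultiples_eq_iterate (seta setb : List Int) :
    ∀ (n : Nat) (mult : List (List Int)), mult.length + n = seta.length →
      allMultiples seta setb mult = (pvStep seta setb)^[n] [mult] := by
  intro n
  induction n with
  | zero =>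
    intro mult h
    rw [allMultiples]
    simp at h
    simp [h]
  | succ n ih =>
    intro mult h
    rw [allMultiples]
    have h1 : mult.length ≠ seta.length := by omega
    have h2 : mult.length < seta.length := by omega
    simp only [h1, if_false, h2, dif_pos]
    have e1 := ih (mult ++ [seta]) (by simp; omega)
    have e2 := ih (mult ++ [setb]) (by simp; omega)
    rw [e1, e2, Function.iterate_succ_apply, ← pvStep_iterate_append]
    rfl

-- ===== VERDICT (by name: the statement is the Claim_ definition above) =====
theorem allMultiples_spec : Claim_equal_allMultiples := by
  intro seta setb mult _ hpre
  unfold Pre_allMultiples at hpre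
  show allMultiples seta setb mult =
    (List.range (seta.length - mult.length)).foldl (fun c _ => pvStep seta setb c) [mult]
  rw [foldl_range_iterate (pvStep seta setb)]
  exact allMultiples_eq_iterate seta setb (seta.length - mult.length) mult (by omega)
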